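-- pv_equiv track=rewrite | github.com/guntankoba/csv_subtitles | remake.py | get_new_vtt_times
-- ===== SOURCE A (Python) =====
-- def get_new_vtt_times(new_times, end_time):
--     new_vtt_times = []
--     end_time = '0' + str(end_time) + '.000'
--     for i, new_time in enumerate(new_times):
--         if(i == (len(new_times) - 1)):
--             vtt_time = new_time + ' --> ' + end_time
--         else:
--             vtt_time = new_time + ' --> ' + new_times[i+1]
--         new_vtt_times.append(vtt_time)
--
--     return new_vtt_times
-- ===== SOURCE B (Python) =====
-- def get_new_vtt_times(new_times, end_time):
--     # Walk the list BACK TO FRONT, carrying the successor ("next") time as an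
--     # accumulator seeded with the formatted end time, then reverse the output.
--     nxt = '0' + str(end_time) + '.000'
--     out = []
--     for t in reversed(new_times):
--         out.append(t + ' --> ' + nxt)
--         nxt = t
--     out.reverse()
--     return out
-- ===== Notes on version B (the rewrite author's own statement) =====
-- stated objective: alternative
-- what changed: Builds the result back-to-front: traverses the reversed list carrying the successor time as an accumulator (seeded with the formatted end time) and reverses at the end, so all index arithmetic, lookahead and the last-element branch disappear.
import Mathlib
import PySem

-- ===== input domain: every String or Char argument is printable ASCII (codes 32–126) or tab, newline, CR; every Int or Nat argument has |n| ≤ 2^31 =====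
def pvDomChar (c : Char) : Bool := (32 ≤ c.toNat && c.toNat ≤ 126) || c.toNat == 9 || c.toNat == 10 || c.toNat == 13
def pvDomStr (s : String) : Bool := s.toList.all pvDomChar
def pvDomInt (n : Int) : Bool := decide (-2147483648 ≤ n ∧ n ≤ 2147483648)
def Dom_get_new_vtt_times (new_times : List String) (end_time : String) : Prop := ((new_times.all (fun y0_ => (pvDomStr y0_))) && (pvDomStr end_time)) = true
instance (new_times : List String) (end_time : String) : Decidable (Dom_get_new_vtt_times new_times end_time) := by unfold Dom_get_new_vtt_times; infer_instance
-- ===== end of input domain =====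

-- B traverses the list back-to-front with the successor time carried as an accumulator (seeded with the formatted end time) and reverses the output, removing A's index arithmetic and last-element branch (alternative decomposition, same cost).


-- ===== PORT A =====
def get_new_vtt_times (new_times : List String) (end_time : String) : List String :=
  let et := "0" ++ end_time ++ ".000"
  (PySem.List.enumerate new_times 0).foldl
    (fun acc p =>
      let vtt := if p.1 = (new_times.length : Int) - 1
        then p.2 ++ " --> " ++ et
        else p.2 ++ " --> " ++ PySem.List.pyGetD new_times (p.1 + 1) ""
      acc ++ [vtt]) []

-- ===== PORT B =====
def get_new_vtt_times_alt (new_times : List String) (end_time : String) : List String :=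
  let et := "0" ++ end_time ++ ".000"
  let st := new_times.reverse.foldl
    (fun (s : List String × String) t => (s.1 ++ [t ++ " --> " ++ s.2], t)) ([], et)
  st.1.reverse

-- ===== PRECONDITION & SPEC =====
def Spec_get_new_vtt_times (new_times : List String) (end_time : String) (out : List String) : Prop := out = get_new_vtt_times_alt new_times end_time
instance (new_times : List String) (end_time : String) (out : List String) : Decidable (Spec_get_new_vtt_times new_times end_time out) := by unfold Spec_get_new_vtt_times; infer_instance

-- ===== CLAIM (what is proved, stated in full; the proofs are below) =====
def Claim_equal_get_new_vtt_times : Prop := ∀ (new_times : List String) (end_time : String), Dom_get_new_vtt_times new_times end_time → Spec_get_new_vtt_times new_times end_time (get_new_vtt_times new_times end_time)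

-- ===== LEMMAS AND PROOFS =====

-- proof-side reference list: both ports are shown equal (elementwise) to this zip form
def zipNext (ts : List String) (et : String) : List String :=
  (ts.zip (ts.drop 1 ++ [et])).map (fun p => p.1 ++ " --> " ++ p.2)

-- entries of B's backward pass, in the (reversed) order B appends them
def revGo (rs : List String) (nxt : String) : List String :=
  match rs with
  | [] => []
  | t :: ts => (t ++ " --> " ++ nxt) :: revGo ts t

theorem foldl_revGo (rs : List String) (acc : List String) (nxt : String) :
    (rs.foldl (fun (s : List String × String) t => (s.1 ++ [t ++ " --> " ++ s.2], t)) (acc, nxt)).1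
      = acc ++ revGo rs nxt := by
  induction rs generalizing acc nxt with
  | nil => simp [revGo]
  | cons t ts ih => simp [revGo, ih]

theorem revGo_length (rs : List String) (nxt : String) : (revGo rs nxt).length = rs.length := by
  induction rs generalizing nxt with
  | nil => rfl
  | cons t ts ih => simp [revGo, ih]

theorem revGo_getElem (rs : List String) (nxt : String) (i : Nat) (hi : i < rs.length) :
    (revGo rs nxt)[i]'(by rw [revGo_length]; exact hi)
      = rs[i] ++ " --> " ++ (if h : i = 0 then nxt else rs[i-1]'(by omega)) := by
  induction rs generalizing nxt i with
  | nil => simp at hi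
  | cons t ts ih =>
    cases i with
    | zero => simp [revGo]
    | succ j =>
      have hj : j < ts.length := by simpa using hi
      simp only [revGo, List.getElem_cons_succ]
      rw [ih t j hj]
      cases j with
      | zero => simp
      | succ k => simp

theorem alt_eq_zipNext (ts : List String) (et : String) :
    get_new_vtt_times_alt ts et = zipNext ts ("0" ++ et ++ ".000") := by
  show ((ts.reverse.foldl (fun (s : List String × String) t => (s.1 ++ [t ++ " --> " ++ s.2], t)) ([], "0" ++ et ++ ".000")).1).reverse = _
  set e := "0" ++ et ++ ".000" with he
  rw [foldl_revGo, List.nil_append]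
  show _ = zipNext ts e
  unfold zipNext
  apply List.ext_getElem
  · simp [revGo_length]
    omega
  · intro j hj hj'
    have hn : j < ts.length := by
      simpa [revGo_length] using hj
    have hlen : (revGo ts.reverse e).length = ts.length := by simp [revGo_length]
    rw [List.getElem_reverse]
    simp only [hlen]
    have hb : ts.length - 1 - j < ts.reverse.length := by simp; omega
    rw [revGo_getElem ts.reverse e (ts.length - 1 - j) hb]
    simp only [List.getElem_map, List.getElem_zip]
    have hrev : ts.reverse[ts.length - 1 - j]'hb = ts[j] := by
      rw [List.getElem_reverse]
      congr 1
      omega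
    rw [hrev]
    by_cases hlast : j = ts.length - 1
    · have h0 : ts.length - 1 - j = 0 := by omega
      rw [dif_pos (by omega : ts.length - 1 - j = 0)]
      have hbz : j < (ts.drop 1 ++ [e]).length := by simp; omega
      have : (ts.drop 1 ++ [e])[j]'hbz = e := by
        rw [List.getElem_append_right (by simp; omega)]
        simp
      rw [this]
    · have hne : ¬ (ts.length - 1 - j = 0) := by omega
      rw [dif_neg hne]
      have hrev2 : ts.reverse[ts.length - 1 - j - 1]'(by simp; omega) = ts[j+1]'(by omega) := by
        rw [List.getElem_reverse]
        congr 1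
        omega
      rw [hrev2]
      have hbz : j < (ts.drop 1 ++ [e]).length := by simp; omega
      have : (ts.drop 1 ++ [e])[j]'hbz = ts[j+1]'(by omega) := by
        rw [List.getElem_append_left (by simp; omega)]
        simp
      rw [this]

theorem a_eq_zipNext (new_times : List String) (end_time : String) :
    get_new_vtt_times new_times end_time = zipNext new_times ("0" ++ end_time ++ ".000") := by
  unfold get_new_vtt_times zipNext
  set et := "0" ++ end_time ++ ".000" with het
  rw [PySem.List.foldl_append_singleton_eq_map, List.nil_append]
  apply List.ext_getElem
  · simp [PySem.List.length_enumerate]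
    omega
  · intro i hi hi'
    simp only [List.getElem_map, PySem.List.getElem_enumerate, List.getElem_zip]
    have hn : i < new_times.length := by
      simpa [PySem.List.length_enumerate] using hi
    by_cases hlast : i = new_times.length - 1
    · have : ((0:Int) + i) = (new_times.length : Int) - 1 := by omega
      rw [if_pos this]
      have hb : i < (new_times.drop 1 ++ [et]).length := by simp; omega
      have hidx : (new_times.drop 1 ++ [et])[i]'hb = et := by
        rw [List.getElem_append_right (by simp; omega)]
        simp
      rw [hidx]
    · have : ¬ ((0:Int) + i) = (new_times.length : Int) - 1 := by omega
      rw [if_neg this]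
      have hi1 : i + 1 < new_times.length := by omega
      have hg : PySem.List.pyGetD new_times ((0:Int) + i + 1) "" = new_times[i+1] := by
        have : ((0:Int) + i + 1) = ((i + 1 : Nat) : Int) := by push_cast; ring
        rw [this, PySem.List.pyGetD_natCast]
        simp [List.getD_eq_getElem?_getD, hi1]
      rw [hg]
      have hb : i < (new_times.drop 1 ++ [et]).length := by simp; omega
      have hidx : (new_times.drop 1 ++ [et])[i]'hb = new_times[i+1] := by
        rw [List.getElem_append_left (by simp; omega)]
        simp
      rw [hidx]

-- ===== VERDICT (by name: the statement is the Claim_ definition above) =====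
theorem get_new_vtt_times_spec : Claim_equal_get_new_vtt_times := by
  intro new_times end_time _
  unfold Spec_get_new_vtt_times
  rw [a_eq_zipNext, alt_eq_zipNext]
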